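-- pv_equiv track=rewrite | github.com/anantrathore025/ACC45DAYSOFCODE-2024. | Day 40-USELEC.py | can_candidate_a_win
-- ===== SOURCE A (Python) =====
-- def can_candidate_a_win(test_cases):
--     results = []
--
--     for (N, X), A_votes, B_votes in test_cases:
--         current_wins = sum(1 for i in range(N) if A_votes[i] > B_votes[i])
--         needed_votes = [B_votes[i] - A_votes[i] + 1 for i in range(N) if A_votes[i] <= B_votes[i]]
--
--         needed_votes.sort()
--
--         for needed in needed_votes:
--             if X >= needed:
--                 X -= needed
--                 current_wins += 1
--             else:
--                 break
--
--         results.append("YES" if current_wins > N // 2 else "NO")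
--
--     return results
-- ===== SOURCE B (Python) =====
-- import heapq
--
-- def can_candidate_a_win(test_cases):
--     results = []
--     for (N, X), A_votes, B_votes in test_cases:
--         wins = 0
--         deficits = []
--         for i in range(N):
--             a, b = A_votes[i], B_votes[i]
--             if a > b:
--                 wins += 1
--             else:
--                 deficits.append(b - a + 1)
--         k = N // 2 + 1 - wins
--         if k <= 0:
--             results.append("YES")
--         elif k > len(deficits):
--             results.append("NO")
--         else:
--             results.append("YES" if sum(heapq.nsmallest(k, deficits)) <= X else "NO")
--     return results
-- ===== Notes on version B (the rewrite author's own statement) =====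
-- stated objective: alternative
-- what changed: Instead of sorting all deficits and simulating the greedy spend loop, B computes the exact number k of extra wins needed and compares X against the sum of the k smallest deficits (heapq.nsmallest partial selection), with no greedy simulation.
import Mathlib
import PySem

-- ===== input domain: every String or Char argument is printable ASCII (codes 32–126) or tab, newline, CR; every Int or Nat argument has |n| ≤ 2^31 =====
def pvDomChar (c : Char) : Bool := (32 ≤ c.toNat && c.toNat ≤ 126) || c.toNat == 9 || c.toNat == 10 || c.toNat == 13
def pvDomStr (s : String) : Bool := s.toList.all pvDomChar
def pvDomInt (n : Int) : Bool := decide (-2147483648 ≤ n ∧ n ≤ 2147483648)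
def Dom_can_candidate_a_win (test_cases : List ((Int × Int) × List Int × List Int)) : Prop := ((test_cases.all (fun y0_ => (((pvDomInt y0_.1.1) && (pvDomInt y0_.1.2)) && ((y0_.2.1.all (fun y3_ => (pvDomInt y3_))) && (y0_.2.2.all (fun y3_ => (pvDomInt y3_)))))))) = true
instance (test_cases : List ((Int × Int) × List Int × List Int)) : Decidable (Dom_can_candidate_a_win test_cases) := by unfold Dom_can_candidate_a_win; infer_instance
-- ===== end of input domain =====

-- B replaces A's sort-then-greedy simulation by a direct check: X must cover the sum of the
-- k smallest deficits, where k is the number of extra wins still needed (alternative algorithm).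

-- ===== PORT A =====
-- the greedy spend loop: for needed in needed_votes: if X >= needed: X -= needed; wins += 1 else: break
def pvLoopA : Int → Int → List Int → Int × Int
  | X, wins, [] => (X, wins)
  | X, wins, n :: rest => if X ≥ n then pvLoopA (X - n) (wins + 1) rest else (X, wins)

-- one iteration of A's outer loop (the body for one test case)
def pvCaseA (c : (Int × Int) × List Int × List Int) : String :=
  let N := c.1.1; let X := c.1.2; let Av := c.2.1; let Bv := c.2.2
  let current_wins : Int := (PySem.List.pyRange 0 N 1).foldl
    (fun acc i => if PySem.List.pyGetD Av i 0 > PySem.List.pyGetD Bv i 0 then acc + 1 else acc) 0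
  let needed_votes : List Int :=
    ((PySem.List.pyRange 0 N 1).filter (fun i => PySem.List.pyGetD Av i 0 ≤ PySem.List.pyGetD Bv i 0)).map
      (fun i => PySem.List.pyGetD Bv i 0 - PySem.List.pyGetD Av i 0 + 1)
  let s := PySem.List.sorted needed_votes (fun x => x) false
  let fin := pvLoopA X current_wins s
  if fin.2 > PySem.Int.floordiv N 2 then "YES" else "NO"

def can_candidate_a_win (test_cases : List ((Int × Int) × List Int × List Int)) : List String :=
  test_cases.foldl (fun results c => results ++ [pvCaseA c]) []

-- ===== PORT B =====
-- one iteration of B's loop: single pass collecting wins and deficits, then the k-smallest check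
def pvCaseB (c : (Int × Int) × List Int × List Int) : String :=
  let N := c.1.1; let X := c.1.2; let Av := c.2.1; let Bv := c.2.2
  let st : Int × List Int := (PySem.List.pyRange 0 N 1).foldl
    (fun st i =>
      let a := PySem.List.pyGetD Av i 0; let b := PySem.List.pyGetD Bv i 0
      if a > b then (st.1 + 1, st.2) else (st.1, st.2 ++ [b - a + 1])) (0, [])
  let wins := st.1; let deficits := st.2
  let k := PySem.Int.floordiv N 2 + 1 - wins
  if k ≤ 0 then "YES"
  else if k > (deficits.length : Int) then "NO"
  else if ((PySem.List.sorted deficits (fun x => x) false).take k.toNat).sum ≤ X then "YES" else "NO"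

def can_candidate_a_win_alt (test_cases : List ((Int × Int) × List Int × List Int)) : List String :=
  test_cases.foldl (fun results c => results ++ [pvCaseB c]) []

-- ===== PRECONDITION & SPEC =====
-- Pre_ excludes exactly the inputs where Python A raises IndexError: a test case whose N exceeds
-- the length of A_votes or B_votes.
def Pre_can_candidate_a_win (test_cases : List ((Int × Int) × List Int × List Int)) : Prop :=
  ∀ c ∈ test_cases, c.1.1 ≤ (c.2.1.length : Int) ∧ c.1.1 ≤ (c.2.2.length : Int)
instance (test_cases : List ((Int × Int) × List Int × List Int)) : Decidable (Pre_can_candidate_a_win test_cases) := by unfold Pre_can_candidate_a_win; infer_instance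

def pvWitness_can_candidate_a_win : (List ((Int × Int) × List Int × List Int)) :=
  [((2, 3), [1, 0], [2, 5]), ((1, 0), [4], [1])]

def Spec_can_candidate_a_win (test_cases : List ((Int × Int) × List Int × List Int)) (out : List String) : Prop := out = can_candidate_a_win_alt test_cases
instance (test_cases : List ((Int × Int) × List Int × List Int)) (out : List String) : Decidable (Spec_can_candidate_a_win test_cases out) := by unfold Spec_can_candidate_a_win; infer_instance

-- ===== CLAIM (what is proved, stated in full; the proofs are below) =====
def Claim_equal_can_candidate_a_win : Prop := ∀ (test_cases : List ((Int × Int) × List Int × List Int)), Dom_can_candidate_a_win test_cases → Pre_can_candidate_a_win test_cases → Spec_can_candidate_a_win test_cases (can_candidate_a_win test_cases)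

-- ===== LEMMAS AND PROOFS =====

-- the final wins of A's greedy loop, expressed via a pure count
def pvGreedy : Int → List Int → Nat
  | _, [] => 0
  | X, n :: rest => if X ≥ n then pvGreedy (X - n) rest + 1 else 0

theorem pvLoopA_snd (X wins : Int) (s : List Int) :
    (pvLoopA X wins s).2 = wins + (pvGreedy X s : Int) := by
  induction s generalizing X wins with
  | nil => simp [pvLoopA, pvGreedy]
  | cons n rest ih =>
    simp only [pvLoopA, pvGreedy]
    split_ifs with h
    · rw [ih]; push_cast; ring
    · simp

theorem pvGreedy_ge_iff (S : List Int) (X : Int) (k : Nat)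
    (hpos : ∀ x ∈ S, 0 ≤ x) (hk : 1 ≤ k) :
    k ≤ pvGreedy X S ↔ k ≤ S.length ∧ (S.take k).sum ≤ X := by
  induction S generalizing X k with
  | nil => simp [pvGreedy]; omega
  | cons n rest ih =>
    have hn : 0 ≤ n := hpos n (by simp)
    have hrest : ∀ x ∈ rest, 0 ≤ x := fun x hx => hpos x (by simp [hx])
    simp only [pvGreedy]
    split_ifs with h
    · -- X ≥ n
      rcases Nat.eq_or_lt_of_le hk with h1 | h1
      · subst h1; simp [h]
      · obtain ⟨k', rfl⟩ : ∃ k', k = k' + 1 := ⟨k - 1, by omega⟩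
        have hk' : 1 ≤ k' := by omega
        have := ih (X - n) k' hrest hk'
        simp only [List.take_succ_cons, List.sum_cons, List.length_cons]
        constructor
        · intro hle
          have h2 := this.mp (by omega)
          exact ⟨by omega, by omega⟩
        · intro ⟨hl, hs⟩
          have h2 := this.mpr ⟨by omega, by omega⟩
          omega
    · -- X < n
      constructor
      · omega
      · rintro ⟨hl, hs⟩
        exfalso
        obtain ⟨k', rfl⟩ : ∃ k', k = k' + 1 := ⟨k - 1, by omega⟩
        simp only [List.take_succ_cons, List.sum_cons] at hs
        have : 0 ≤ (rest.take k').sum :=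
          List.sum_nonneg (fun x hx => hrest x (List.mem_of_mem_take hx))
        omega

-- B's paired fold equals (A's wins count, A's deficit list)
theorem pvFold_pair (Av Bv : List Int) (l : List Int) (w : Int) (d : List Int) :
    l.foldl (fun st i =>
      let a := PySem.List.pyGetD Av i 0; let b := PySem.List.pyGetD Bv i 0
      if a > b then (st.1 + 1, st.2) else (st.1, st.2 ++ [b - a + 1])) (w, d)
    = (l.foldl (fun acc i => if PySem.List.pyGetD Av i 0 > PySem.List.pyGetD Bv i 0 then acc + 1 else acc) w,
       d ++ (l.filter (fun i => PySem.List.pyGetD Av i 0 ≤ PySem.List.pyGetD Bv i 0)).map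
         (fun i => PySem.List.pyGetD Bv i 0 - PySem.List.pyGetD Av i 0 + 1)) := by
  induction l generalizing w d with
  | nil => simp
  | cons x xs ih =>
    simp only [List.foldl_cons, List.filter_cons]
    by_cases h : PySem.List.pyGetD Av x 0 > PySem.List.pyGetD Bv x 0
    · have h' : ¬ (PySem.List.pyGetD Av x 0 ≤ PySem.List.pyGetD Bv x 0) := by omega
      simp only [h, if_pos]
      rw [ih]
      simp [h']
    · have h' : PySem.List.pyGetD Av x 0 ≤ PySem.List.pyGetD Bv x 0 := by omega
      simp only [h, if_neg, not_false_iff]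
      rw [ih]
      simp [h']

-- elements of the deficit list are ≥ 1 (hence nonneg)
theorem pvDeficits_nonneg (N : Int) (Av Bv : List Int) :
    ∀ x ∈ ((PySem.List.pyRange 0 N 1).filter (fun i => PySem.List.pyGetD Av i 0 ≤ PySem.List.pyGetD Bv i 0)).map
      (fun i => PySem.List.pyGetD Bv i 0 - PySem.List.pyGetD Av i 0 + 1), 0 ≤ x := by
  intro x hx
  simp only [List.mem_map, List.mem_filter, decide_eq_true_eq] at hx
  obtain ⟨i, ⟨_, hle⟩, rfl⟩ := hx
  omega

-- the heart of the equivalence: A's greedy spend over the sorted deficits exceeds t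
-- exactly when X covers the k = t + 1 - wins smallest deficits
theorem pvKey (t X wins : Int) (dl : List Int) (hnn : ∀ x ∈ dl, 0 ≤ x) :
    (if (pvLoopA X wins (PySem.List.sorted dl (fun x => x) false)).2 > t then "YES" else "NO")
    = (if t + 1 - wins ≤ 0 then "YES"
       else if t + 1 - wins > (dl.length : Int) then "NO"
       else if ((PySem.List.sorted dl (fun x => x) false).take (t + 1 - wins).toNat).sum ≤ X
         then "YES" else "NO") := by
  set S := PySem.List.sorted dl (fun x => x) false with hS
  have hlen : S.length = dl.length := PySem.List.length_sorted ..
  have hSnn : ∀ x ∈ S, 0 ≤ x := fun x hx => hnn x ((PySem.List.mem_sorted ..).mp hx)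
  rw [pvLoopA_snd]
  by_cases hk : t + 1 - wins ≤ 0
  · have hgt : wins + (pvGreedy X S : Int) > t := by
      have := Int.natCast_nonneg (pvGreedy X S); omega
    rw [if_pos hgt, if_pos hk]
  · have hkn1 : 1 ≤ (t + 1 - wins).toNat := by omega
    have hkcast : (((t + 1 - wins).toNat : Nat) : Int) = t + 1 - wins :=
      Int.toNat_of_nonneg (by omega)
    have hiff := pvGreedy_ge_iff S X (t + 1 - wins).toNat hSnn hkn1
    have hmain : (wins + (pvGreedy X S : Int) > t) ↔ ((t + 1 - wins).toNat ≤ pvGreedy X S) := by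
      omega
    rw [if_neg hk]
    by_cases hbig : t + 1 - wins > (dl.length : Int)
    · have h1 : ¬ ((t + 1 - wins).toNat ≤ S.length) := by rw [hlen]; omega
      have hf : ¬ (wins + (pvGreedy X S : Int) > t) := by
        rw [hmain, hiff]; tauto
      rw [if_neg hf, if_pos hbig]
    · have h1 : (t + 1 - wins).toNat ≤ S.length := by rw [hlen]; omega
      by_cases hsum : (S.take (t + 1 - wins).toNat).sum ≤ X
      · have hgt : wins + (pvGreedy X S : Int) > t := by
          rw [hmain, hiff]; exact ⟨h1, hsum⟩
        rw [if_pos hgt, if_neg hbig, if_pos hsum]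
      · have hf : ¬ (wins + (pvGreedy X S : Int) > t) := by
          rw [hmain, hiff]; tauto
        rw [if_neg hf, if_neg hbig, if_neg hsum]

theorem pvCase_eq (c : (Int × Int) × List Int × List Int) : pvCaseA c = pvCaseB c := by
  obtain ⟨⟨N, X⟩, Av, Bv⟩ := c
  show (if (pvLoopA X
        ((PySem.List.pyRange 0 N 1).foldl
          (fun acc i => if PySem.List.pyGetD Av i 0 > PySem.List.pyGetD Bv i 0 then acc + 1 else acc) (0 : Int))
        (PySem.List.sorted
          (((PySem.List.pyRange 0 N 1).filter
              (fun i => PySem.List.pyGetD Av i 0 ≤ PySem.List.pyGetD Bv i 0)).map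
            (fun i => PySem.List.pyGetD Bv i 0 - PySem.List.pyGetD Av i 0 + 1))
          (fun x => x) false)).2 > PySem.Int.floordiv N 2 then "YES" else "NO")
    = (let st := (PySem.List.pyRange 0 N 1).foldl
        (fun st i =>
          let a := PySem.List.pyGetD Av i 0; let b := PySem.List.pyGetD Bv i 0
          if a > b then (st.1 + 1, st.2) else (st.1, st.2 ++ [b - a + 1])) ((0 : Int), ([] : List Int));
       if PySem.Int.floordiv N 2 + 1 - st.1 ≤ 0 then "YES"
       else if PySem.Int.floordiv N 2 + 1 - st.1 > (st.2.length : Int) then "NO"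
       else if ((PySem.List.sorted st.2 (fun x => x) false).take
           (PySem.Int.floordiv N 2 + 1 - st.1).toNat).sum ≤ X then "YES" else "NO")
  rw [pvFold_pair]
  exact pvKey (PySem.Int.floordiv N 2) X _ _ (fun x hx => pvDeficits_nonneg N Av Bv x hx)

theorem pv_foldl_map (tcs : List ((Int × Int) × List Int × List Int))
    (f : ((Int × Int) × List Int × List Int) → String) (acc : List String) :
    tcs.foldl (fun results c => results ++ [f c]) acc = acc ++ tcs.map f := by
  induction tcs generalizing acc with
  | nil => simp
  | cons c cs ih => simp [ih]

-- ===== VERDICT (by name: the statement is the Claim_ definition above) =====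
theorem can_candidate_a_win_spec : Claim_equal_can_candidate_a_win := by
  intro tcs _ _
  unfold Spec_can_candidate_a_win can_candidate_a_win can_candidate_a_win_alt
  rw [pv_foldl_map, pv_foldl_map]
  simp only [List.nil_append]
  exact List.map_congr_left (fun c _ => pvCase_eq c)
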